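-- pv_equiv track=rewrite | github.com/pickettbd/TANOS | src/taxaResiliency/calcScore.py | generateReplicatesHistogram
-- ===== SOURCE A (Python) =====
-- def generateReplicatesHistogram(reps):
-- 	# do the counting
-- 	counts = {}
-- 	for rep in reps:
-- 		if not rep in counts:
-- 			counts[rep] = 0
-- 		counts[rep] += 1
--
-- 	# do some formatting
-- 	counts_max_width = len(str(max(list(counts.keys()))))
-- 	left_pad_char = ' '
-- 	sep = "|"
-- 	tick_mark = '='
-- 	line_fmt = f"{{c:{left_pad_char}{counts_max_width}}}{sep}{{t}} ({{f}})\n".format # c: count, t: ticks, f: freq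
--
-- 	# create the visual repr of the hist
-- 	output = ""
-- 	for count in sorted(list(counts.keys())):
-- 		freq = counts[count]
-- 		ticks = tick_mark * freq
-- 		output += line_fmt(c=count, t=ticks, f=freq)
--
-- 	return output
-- ===== SOURCE B (Python) =====
-- def generateReplicatesHistogram(reps):
-- 	# sort once, then run-length scan consecutive equal values (no dict, no key sort)
-- 	s = sorted(reps)
-- 	counts_max_width = len(str(s[-1]))
-- 	out = []
-- 	i = 0
-- 	n = len(s)
-- 	while i < n:
-- 		j = i + 1
-- 		while j < n and s[j] == s[i]:
-- 			j += 1
-- 		freq = j - i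
-- 		out.append(f"{s[i]: {counts_max_width}}|{'=' * freq} ({freq})\n")
-- 		i = j
-- 	return "".join(out)
-- ===== Notes on version B (the rewrite author's own statement) =====
-- stated objective: alternative
-- what changed: Replaces dict-based counting plus a separate key sort with a single sort of the input followed by a run-length scan that groups consecutive equal values (groups come out already in ascending order).
import Mathlib
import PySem

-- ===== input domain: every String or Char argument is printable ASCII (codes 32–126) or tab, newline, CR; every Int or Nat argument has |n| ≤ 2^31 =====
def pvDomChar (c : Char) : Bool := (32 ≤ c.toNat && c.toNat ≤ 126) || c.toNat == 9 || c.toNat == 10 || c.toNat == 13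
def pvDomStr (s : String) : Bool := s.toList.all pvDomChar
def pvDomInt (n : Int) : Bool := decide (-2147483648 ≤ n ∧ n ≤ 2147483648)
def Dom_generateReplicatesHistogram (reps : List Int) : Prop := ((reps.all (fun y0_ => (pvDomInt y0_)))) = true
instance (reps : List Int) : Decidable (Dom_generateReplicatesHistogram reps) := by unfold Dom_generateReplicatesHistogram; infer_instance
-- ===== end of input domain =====

-- B replaces A's dict counting + key sort with one sort of the input followed by a
-- run-length scan of consecutive equal values (objective: alternative algorithm, same cost).

-- Shared formatting helper: both Pythons format each line with the same f-string
-- "{c: w}|{ticks} ({f})\n"; the format spec ' w' is sign-space, minimum width w,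
-- right-aligned with space fill.  Exact for ints: the rendered int with its ' ' or '-'
-- sign is left-padded with spaces to width w.
def pvSigned (c : Int) : String :=
  if c < 0 then PySem.Int.toStr c else " " ++ PySem.Int.toStr c

def pvFmtLine (w : Nat) (c : Int) (f : Int) : String :=
  String.ofList (List.replicate (w - (pvSigned c).toList.length) ' ') ++ pvSigned c
    ++ "|" ++ String.ofList (PySem.List.pyRepeat ['='] f) ++ " (" ++ PySem.Int.toStr f ++ ")\n"

-- ===== PORT A =====
-- counting loop: 'if not rep in counts: counts[rep] = 0' then 'counts[rep] += 1'
def generateReplicatesHistogram (reps : List Int) : String :=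
  let counts : PySem.Dict Int Int := reps.foldl (fun d rep =>
    let d' := if d.contains rep then d else d.insert rep 0
    d'.insert rep (d'.getD rep 0 + 1)) (PySem.Dict.mk [])
  -- counts_max_width = len(str(max(list(counts.keys())))); max([]) raises ValueError (outside Pre_)
  match PySem.List.max? counts.keys (fun x => x) with
  | none => ""
  | some m =>
    let w := (PySem.Int.toStr m).toList.length
    (PySem.List.sorted counts.keys (fun x => x)).foldl
      (fun output c => output ++ pvFmtLine w c (counts.getD c 0)) ""

-- ===== PORT B =====
-- the inner run scan 'j = i + 1; while j < n and s[j] == s[i]: j += 1' as a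
-- structural recursion: take the run of values equal to the head, recurse on the rest
def pvRuns : List Int → List (Int × Int)
  | [] => []
  | x :: xs =>
    (x, 1 + (xs.takeWhile (· == x)).length) :: pvRuns (xs.dropWhile (· == x))
termination_by l => l.length
decreasing_by
  exact Nat.lt_succ_of_le (List.length_dropWhile_le _ _)

def generateReplicatesHistogram_alt (reps : List Int) : String :=
  let s := PySem.List.sorted reps (fun x => x)
  -- counts_max_width = len(str(s[-1])); s[-1] raises IndexError on empty s (outside Pre_)
  match PySem.List.pyGet? s (-1) with
  | none => ""
  | some last =>
    let w := (PySem.Int.toStr last).toList.length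
    -- out.append(line) per run, then "".join(out): join with empty separator is
    -- exactly left-to-right concatenation
    ((pvRuns s).map (fun p => pvFmtLine w p.1 p.2)).foldl (· ++ ·) ""

-- ===== PRECONDITION & SPEC =====
-- Pre_ excludes only the empty list, on which A raises ValueError (max() of an empty
-- sequence) and B raises IndexError (s[-1]).
def Pre_generateReplicatesHistogram (reps : List Int) : Prop := reps ≠ []
instance (reps : List Int) : Decidable (Pre_generateReplicatesHistogram reps) := by unfold Pre_generateReplicatesHistogram; infer_instance
def pvWitness_generateReplicatesHistogram : List Int := [3, -1, 3, 10]

def Spec_generateReplicatesHistogram (reps : List Int) (out : String) : Prop := out = generateReplicatesHistogram_alt reps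
instance (reps : List Int) (out : String) : Decidable (Spec_generateReplicatesHistogram reps out) := by unfold Spec_generateReplicatesHistogram; infer_instance

-- ===== CLAIM (what is proved, stated in full; the proofs are below) =====
def Claim_equal_generateReplicatesHistogram : Prop := ∀ (reps : List Int), Dom_generateReplicatesHistogram reps → Pre_generateReplicatesHistogram reps → Spec_generateReplicatesHistogram reps (generateReplicatesHistogram reps)

-- ===== LEMMAS AND PROOFS =====

-- A's counting fold is Counter(reps)
theorem pv_counts_eq_counter (reps : List Int) :
    reps.foldl (fun d rep =>
      let d' := if d.contains rep then d else d.insert rep 0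
      d'.insert rep (d'.getD rep 0 + 1)) (PySem.Dict.mk []) = PySem.Dict.counter reps := by
  rw [← PySem.Dict.foldl_insert_getD_add_one_eq_counter]
  congr 1
  funext d rep
  by_cases h : d.contains rep = true
  · simp [h]
  · simp only [Bool.not_eq_true] at h
    simp only [h, Bool.false_eq_true, if_false]
    rw [PySem.Dict.getD_insert_self, PySem.Dict.insert_insert_self,
      PySem.Dict.getD_of_not_contains d 0 h]

-- everything surviving the dropWhile of a run is strictly above the run's value
theorem pv_drop_lt (x : Int) (xs : List Int) (hall : ∀ y ∈ xs, x ≤ y)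
    (hp : xs.Pairwise (· ≤ ·)) : ∀ y ∈ xs.dropWhile (· == x), x < y := by
  induction xs with
  | nil => simp
  | cons a l ih =>
    by_cases ha : a = x
    · subst ha
      rw [List.dropWhile_cons_of_pos (by simp)]
      exact ih (fun y hy => hall y (List.mem_cons_of_mem _ hy)) hp.tail
    · rw [List.dropWhile_cons_of_neg (by simp [ha])]
      intro y hy
      rcases List.mem_cons.mp hy with rfl | hy'
      · exact lt_of_le_of_ne (hall y List.mem_cons_self) (Ne.symm ha)
      · exact lt_of_lt_of_le
          (lt_of_le_of_ne (hall a List.mem_cons_self) (Ne.symm ha))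
          (List.rel_of_pairwise_cons hp hy')

theorem pv_mem_runs_fst (s : List Int) (c : Int) : c ∈ (pvRuns s).map Prod.fst ↔ c ∈ s := by
  induction s using pvRuns.induct with
  | case1 => simp [pvRuns]
  | case2 x xs ih =>
    simp only [pvRuns, List.map_cons, List.mem_cons, ih]
    constructor
    · rintro (rfl | h)
      · exact Or.inl rfl
      · exact Or.inr ((List.dropWhile_sublist _).mem h)
    · rintro (rfl | h)
      · exact Or.inl rfl
      · rw [← List.takeWhile_append_dropWhile (p := (· == x)) (l := xs)] at h
        rcases List.mem_append.mp h with h' | h'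
        · exact Or.inl (by simpa using List.mem_takeWhile_imp h')
        · exact Or.inr h'

-- the run values of a ≤-sorted list are strictly increasing
theorem pv_runs_fst_pairwise (s : List Int) (h : s.Pairwise (· ≤ ·)) :
    ((pvRuns s).map Prod.fst).Pairwise (· < ·) := by
  induction s using pvRuns.induct with
  | case1 => simp [pvRuns]
  | case2 x xs ih =>
    simp only [pvRuns, List.map_cons]
    refine List.Pairwise.cons ?_ (ih (h.tail.sublist (List.dropWhile_sublist _)))
    intro c hc
    exact pv_drop_lt x xs (fun y hy => List.rel_of_pairwise_cons h hy) h.tail c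
      ((pv_mem_runs_fst _ c).mp hc)

-- on a ≤-sorted list each run length is the total multiplicity of its value
theorem pv_runs_snd (s : List Int) (h : s.Pairwise (· ≤ ·)) :
    ∀ p ∈ pvRuns s, p.2 = (s.count p.1 : Int) := by
  induction s using pvRuns.induct with
  | case1 => simp [pvRuns]
  | case2 x xs ih =>
    intro p hp
    have hdlt := pv_drop_lt x xs (fun y hy => List.rel_of_pairwise_cons h hy) h.tail
    have hxs : List.count p.1 xs
        = List.count p.1 (xs.takeWhile (· == x)) + List.count p.1 (xs.dropWhile (· == x)) := by
      conv_lhs => rw [← List.takeWhile_append_dropWhile (p := (· == x)) (l := xs)]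
      rw [List.count_append]
    have hsplit : List.count p.1 (x :: xs)
        = List.count p.1 (x :: xs.takeWhile (· == x)) + List.count p.1 (xs.dropWhile (· == x)) := by
      simp only [List.count_cons, hxs]; omega
    simp only [pvRuns] at hp
    rcases List.mem_cons.mp hp with rfl | hp'
    · simp only [hsplit]
      have h1 : List.count x (x :: xs.takeWhile (· == x)) = 1 + (xs.takeWhile (· == x)).length := by
        rw [List.count_cons_self, List.count_eq_length.mpr]
        · omega
        · intro y hy; exact (by simpa using List.mem_takeWhile_imp hy : y = x).symm
      have h2 : List.count x (xs.dropWhile (· == x)) = 0 :=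
        List.count_eq_zero.mpr (fun hm => lt_irrefl x (hdlt x hm))
      simp [h1, h2]
    · have hne : p.1 ≠ x := by
        have : p.1 ∈ xs.dropWhile (· == x) :=
          (pv_mem_runs_fst _ p.1).mp (List.mem_map_of_mem hp')
        exact fun he => lt_irrefl x (he ▸ hdlt p.1 this)
      have h1 : List.count p.1 (x :: xs.takeWhile (· == x)) = 0 := by
        rw [List.count_eq_zero]
        intro hm
        rcases List.mem_cons.mp hm with he | hm'
        · exact hne he
        · exact hne (by simpa using List.mem_takeWhile_imp hm')
      rw [ih (h.tail.sublist (List.dropWhile_sublist _)) p hp', hsplit, h1]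
      simp

theorem pv_last_is_max (s : List Int) (h : s.Pairwise (· ≤ ·)) :
    ∀ y ∈ s, ∀ (hne : s ≠ []), y ≤ s.getLast hne := by
  induction s with
  | nil => simp
  | cons a l ih =>
    intro y hy hne
    cases l with
    | nil =>
      rcases List.mem_cons.mp hy with rfl | h'
      · simp
      · simp at h'
    | cons b m =>
      rw [List.getLast_cons (by simp)]
      rcases List.mem_cons.mp hy with rfl | hy'
      · exact List.rel_of_pairwise_cons h (List.getLast_mem _)
      · exact ih h.tail y hy' (by simp)

-- s[-1] of a nonempty list is its last element
theorem pv_pyGet_neg_one (s : List Int) (h : s ≠ []) :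
    PySem.List.pyGet? s (-1) = some (s.getLast h) := by
  have hl : 1 ≤ s.length := List.length_pos_iff.mpr h
  have hidx : PySem.List.pyIdx? s.length (-1) = some (s.length - 1) := by
    simp only [PySem.List.pyIdx?]
    rw [if_neg (by omega), if_pos (by omega)]; norm_num
  rw [PySem.List.pyGet?, hidx, Option.bind_some]
  rw [← List.getLast?_eq_getElem?, List.getLast?_eq_some_getLast h]

-- ===== VERDICT (by name: the statement is the Claim_ definition above) =====
theorem generateReplicatesHistogram_spec : Claim_equal_generateReplicatesHistogram := by
  intro reps _ hpre
  unfold Spec_generateReplicatesHistogram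
  set s := PySem.List.sorted reps (fun x => x) with hs
  have hsp : s.Pairwise (· ≤ ·) := by
    simpa using PySem.List.sorted_pairwise reps (fun x => x)
  have hsne : s ≠ [] := by
    rw [hs, Ne, PySem.List.sorted_eq_nil_iff]; exact hpre
  have hpermS : s.Perm reps := PySem.List.sorted_perm reps _ _
  have hKpair := pv_runs_fst_pairwise s hsp
  have hKnodup : ((pvRuns s).map Prod.fst).Nodup := hKpair.imp (fun hlt => ne_of_lt hlt)
  have hperm : ((pvRuns s).map Prod.fst).Perm (PySem.Set.ofList reps) := by
    rw [List.perm_ext_iff_of_nodup hKnodup (PySem.Set.nodup_ofList reps)]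
    intro c
    rw [pv_mem_runs_fst, PySem.Set.mem_ofList]
    exact hpermS.mem_iff
  have hsortK : PySem.List.sorted (PySem.Set.ofList reps) (fun x => x) = (pvRuns s).map Prod.fst :=
    PySem.List.sorted_eq_of_perm_of_pairwise_lt _ _ _ hperm hKpair
  have hMmem : s.getLast hsne ∈ PySem.Set.ofList reps :=
    (PySem.Set.mem_ofList _ _).mpr (hpermS.mem_iff.mp (List.getLast_mem hsne))
  have hmax : PySem.List.max? (PySem.Set.ofList reps) (fun x => x) = some (s.getLast hsne) := by
    cases hm : PySem.List.max? (PySem.Set.ofList reps) (fun x => x) with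
    | none =>
      rw [PySem.List.max?_eq_none_iff] at hm
      rw [hm] at hMmem
      simp at hMmem
    | some m =>
      have h1 : m ≤ s.getLast hsne :=
        pv_last_is_max s hsp m
          (hpermS.mem_iff.mpr ((PySem.Set.mem_ofList _ _).mp (PySem.List.max?_mem hm))) hsne
      have h2 : s.getLast hsne ≤ m := PySem.List.max?_isMax hm _ hMmem
      rw [le_antisymm h1 h2]
  have hc : ∀ p ∈ pvRuns s, (PySem.Dict.counter reps).getD p.1 0 = p.2 := by
    intro p hp
    rw [PySem.Dict.getD_counter, pv_runs_snd s hsp p hp, hpermS.count_eq p.1]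
  simp only [generateReplicatesHistogram, generateReplicatesHistogram_alt,
    pv_counts_eq_counter, PySem.Dict.keys_counter, ← hs]
  rw [hmax, pv_pyGet_neg_one s hsne]
  simp only [hsortK]
  rw [List.foldl_map, List.foldl_map]
  exact PySem.List.foldl_congr_mem _ _ _ _ (fun acc p hp => by rw [hc p hp])
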